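-- pv_equiv track=rewrite | github.com/jejinmyeong/algorithm | algorithm_python/programmers/17686.py | solution
-- ===== SOURCE A (Python) =====
-- def solution(files):
-- 	answer = []
-- 	seq_files = []
--
-- 	for idx, f in enumerate(files):
-- 		now = 0
-- 		check = 0
-- 		seq_files.append(['','','',idx])
-- 		for jdx, w in enumerate(f):
-- 			if w.isdigit() == 1:
-- 				if check == 1:
-- 					seq_files[idx][2] += w
-- 				else:
-- 					seq_files[idx][1] += w
-- 			else:
-- 				if len(seq_files[idx][1]) != 0:
-- 					check = 1
-- 				if check == 0:
-- 					seq_files[idx][0] += w.lower()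
-- 				else:
-- 					seq_files[idx][2] += w.lower()
--
-- 		seq_files[idx][1] = int(seq_files[idx][1])
--
--
--
-- 	seq_files.sort(key = lambda x: (x[0], x[1]))
--
-- 	for i in seq_files:
-- 		answer.append(files[i[3]])
--
-- 	return answer
-- ===== SOURCE B (Python) =====
-- def solution(files):
--     # Sort directly with a key function: (lowercased non-digit head, value of first digit run).
--     # int(f[i:j]) raises ValueError on a digit-less filename, exactly as A's int('') does.
--     def key(f):
--         i = 0
--         while i < len(f) and not f[i].isdigit():
--             i += 1
--         j = i
--         while j < len(f) and f[j].isdigit():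
--             j += 1
--         return (f[:i].lower(), int(f[i:j]))
--     return sorted(files, key=key)
-- ===== Notes on version B (the rewrite author's own statement) =====
-- stated objective: simpler
-- what changed: Replaces A's check-flag state machine building a parallel [head,num,tail,idx] list that is sorted and then re-projected through the stored indices with a direct sorted(files, key=...) whose key function scans the head and the first digit run with two index pointers; the tail field and the index reconstruction disappear, relying on sort stability for ties.
import Mathlib
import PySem

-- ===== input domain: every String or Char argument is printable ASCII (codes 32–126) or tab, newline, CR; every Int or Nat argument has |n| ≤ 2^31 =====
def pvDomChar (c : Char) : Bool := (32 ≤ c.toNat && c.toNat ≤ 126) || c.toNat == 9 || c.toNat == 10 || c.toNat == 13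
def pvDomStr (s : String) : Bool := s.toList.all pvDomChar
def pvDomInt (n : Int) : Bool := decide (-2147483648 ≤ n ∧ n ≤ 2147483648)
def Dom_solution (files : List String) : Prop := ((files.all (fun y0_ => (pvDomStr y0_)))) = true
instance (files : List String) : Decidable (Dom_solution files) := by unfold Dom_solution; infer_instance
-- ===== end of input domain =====

-- B replaces A's check-flag state machine over a parallel [head,num,tail,idx] list (sorted, then
-- re-projected through the stored indices) with a direct key-function sort; same cost, simpler.

-- ===== PORT A =====
-- One step of A's inner character loop; state = (head, num, tail, check) with check as Bool (A's 0/1 flag).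
def pvStepA : (List Char × List Char × List Char × Bool) → Char → (List Char × List Char × List Char × Bool)
  | (h, n, t, check), w =>
    if PySem.Chars.strIsdigit [w] then          -- w.isdigit()
      if check then (h, n, t ++ [w], check)
      else (h, n ++ [w], t, check)
    else
      let check := if n.length ≠ 0 then true else check
      if check then (h, n, t ++ PySem.Chars.lower [w], check)   -- w.lower()
      else (h ++ PySem.Chars.lower [w], n, t, check)

-- One iteration of A's outer loop: the appended ['','','',idx] entry mutated in place by the inner
-- loop, then seq_files[idx][1] = int(...); int('') raises (ofChars? = none, excluded by Pre_), getD totalizes.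
def pvEntryA (idx : Int) (f : String) : String × Int × String × Int :=
  let st := f.toList.foldl pvStepA ([], [], [], false)
  (String.mk st.1, (PySem.Int.ofChars? st.2.1).getD 0, String.mk st.2.2.1, idx)

def solution (files : List String) : List String :=
  let seq_files := (PySem.List.enumerate files).foldl (fun acc p => acc ++ [pvEntryA p.1 p.2]) []
  let sorted := PySem.List.sorted2 seq_files (fun x => x.1) (fun x => x.2.1)   -- sort(key=(x[0],x[1]))
  sorted.foldl (fun answer i => answer ++ [(PySem.List.pyGet? files i.2.2.2).getD ""]) []

-- ===== PORT B =====
-- B's while loops compute i = end of the non-digit prefix and j = end of the digit run: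
-- f[:i] is takeWhile (not digit), f[i:j] is takeWhile digit of the remainder — exact on every string.
def pvHeadKey (f : String) : String :=
  String.mk (PySem.Chars.lower (f.toList.takeWhile (fun c => !PySem.Chars.isdigit c)))

-- int(f[i:j]); int('') raises (ofChars? = none, excluded by Pre_), getD totalizes.
def pvNumKey (f : String) : Int :=
  (PySem.Int.ofChars? ((f.toList.dropWhile (fun c => !PySem.Chars.isdigit c)).takeWhile
    PySem.Chars.isdigit)).getD 0

def solution_alt (files : List String) : List String :=
  PySem.List.sorted2 files pvHeadKey pvNumKey

-- ===== PRECONDITION & SPEC =====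
-- Pre_ excludes exactly the inputs where the Python raises: a file without any decimal digit makes
-- A (and B) call int('') → ValueError.
def Pre_solution (files : List String) : Prop :=
  ∀ f ∈ files, f.toList.any PySem.Chars.isdigit = true
instance (files : List String) : Decidable (Pre_solution files) := by
  unfold Pre_solution; infer_instance

def pvWitness_solution : List String := ["img12.png", "IMG10 001", "img2"]

def Spec_solution (files : List String) (out : List String) : Prop := out = solution_alt files
instance (files : List String) (out : List String) : Decidable (Spec_solution files out) := by
  unfold Spec_solution; infer_instance

-- ===== CLAIM (what is proved, stated in full; the proofs are below) =====
def Claim_equal_solution : Prop :=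
  ∀ (files : List String), Dom_solution files → Pre_solution files →
    Spec_solution files (solution files)

-- ===== LEMMAS AND PROOFS =====

-- Phase 3 of A's state machine (check = 1): head and num never change again.
theorem pvFoldA_true (cs : List Char) : ∀ (h n t : List Char),
    (cs.foldl pvStepA (h, n, t, true)).1 = h ∧ (cs.foldl pvStepA (h, n, t, true)).2.1 = n := by
  induction cs with
  | nil => intro h n t; simp
  | cons c cs ih =>
    intro h n t
    by_cases hc : PySem.Chars.strIsdigit [c] = true
    · simpa [List.foldl, pvStepA, hc] using ih h n (t ++ [c])
    · simpa [List.foldl, pvStepA, hc] using ih h n (t ++ PySem.Chars.lower [c])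

-- Phase 2 (check = 0, num nonempty): num extends by the current digit run, head is frozen.
theorem pvFoldA_run (cs : List Char) : ∀ (h n t : List Char), n ≠ [] →
    (cs.foldl pvStepA (h, n, t, false)).1 = h ∧
    (cs.foldl pvStepA (h, n, t, false)).2.1 = n ++ cs.takeWhile PySem.Chars.isdigit := by
  induction cs with
  | nil => intro h n t _; simp
  | cons c cs ih =>
    intro h n t hn
    by_cases hc : PySem.Chars.isdigit c = true
    · have h1 := ih h (n ++ [c]) t (by simp)
      simp only [List.foldl, pvStepA, PySem.Chars.strIsdigit, List.takeWhile] at *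
      simpa [hc, List.append_assoc] using h1
    · have hlen : n.length ≠ 0 := by simpa using hn
      have h1 := pvFoldA_true cs h n (t ++ PySem.Chars.lower [c])
      simp only [List.foldl, pvStepA, PySem.Chars.strIsdigit, List.takeWhile] at *
      simpa [hc, hlen] using h1

-- Phase 1 (check = 0, num empty): A's parse is exactly B's key computation.
theorem pvFoldA_main (cs : List Char) : ∀ (h t : List Char),
    (cs.foldl pvStepA (h, [], t, false)).1
      = h ++ PySem.Chars.lower (cs.takeWhile (fun c => !PySem.Chars.isdigit c)) ∧
    (cs.foldl pvStepA (h, [], t, false)).2.1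
      = (cs.dropWhile (fun c => !PySem.Chars.isdigit c)).takeWhile PySem.Chars.isdigit := by
  induction cs with
  | nil => intro h t; simp [PySem.Chars.lower]
  | cons c cs ih =>
    intro h t
    by_cases hc : PySem.Chars.isdigit c = true
    · have h1 := pvFoldA_run cs h [c] t (by simp)
      simp only [List.foldl, pvStepA, PySem.Chars.strIsdigit, List.takeWhile,
        List.dropWhile] at *
      simpa [hc, PySem.Chars.lower] using h1
    · have h1 := ih (h ++ PySem.Chars.lower [c]) t
      simp only [List.foldl, pvStepA, PySem.Chars.strIsdigit, List.takeWhile,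
        List.dropWhile] at *
      simpa [hc, PySem.Chars.lower, List.append_assoc] using h1

theorem pvEntryA_head (idx : Int) (f : String) : (pvEntryA idx f).1 = pvHeadKey f := by
  simp [pvEntryA, pvHeadKey, (pvFoldA_main f.toList [] []).1]

theorem pvEntryA_num (idx : Int) (f : String) : (pvEntryA idx f).2.1 = pvNumKey f := by
  simp [pvEntryA, pvNumKey, (pvFoldA_main f.toList [] []).2]

theorem pvEntryA_idx (idx : Int) (f : String) : (pvEntryA idx f).2.2.2 = idx := rfl

-- map commutes with a stable insertion when the comparison factors through the map
theorem pvInsertBy_map {α β : Type} (g : α → β) (bef : α → α → Bool) (bef' : β → β → Bool)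
    (hb : ∀ a b, bef a b = bef' (g a) (g b)) (x : α) :
    ∀ ys : List α, (PySem.List.insertBy bef x ys).map g
      = PySem.List.insertBy bef' (g x) (ys.map g) := by
  intro ys
  induction ys with
  | nil => simp [PySem.List.insertBy]
  | cons y ys ih =>
    by_cases h : bef' (g x) (g y) = true
    · simp [PySem.List.insertBy, hb, h]
    · simp [PySem.List.insertBy, hb, h, ih]

theorem pvFoldl_insertBy_map {α β : Type} (g : α → β) (bef : α → α → Bool)
    (bef' : β → β → Bool) (hb : ∀ a b, bef a b = bef' (g a) (g b)) (xs : List α) :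
    ∀ acc : List α,
      (xs.foldl (fun acc x => PySem.List.insertBy bef x acc) acc).map g
        = (xs.map g).foldl (fun acc y => PySem.List.insertBy bef' y acc) (acc.map g) := by
  induction xs with
  | nil => intro acc; simp
  | cons x xs ih =>
    intro acc
    simp only [List.foldl, List.map]
    rw [ih, pvInsertBy_map g bef bef' hb]

theorem pvSorted2_map {α β κ₁ κ₂ : Type} [LT κ₁] [DecidableLT κ₁] [LT κ₂] [DecidableLT κ₂]
    (g : α → β) (k1 : β → κ₁) (k2 : β → κ₂) (xs : List α) :
    PySem.List.sorted2 (xs.map g) k1 k2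
      = (PySem.List.sorted2 xs (fun a => k1 (g a)) (fun a => k2 (g a))).map g := by
  unfold PySem.List.sorted2
  simp only [if_neg (by decide : ¬ (false = true))]
  exact (pvFoldl_insertBy_map g _ _ (fun a b => rfl) xs []).symm

theorem pvEnum_eq_zipIdx {α : Type} (xs : List α) : ∀ (s : Nat),
    PySem.List.enumerate xs (s : Int) = (xs.zipIdx s).map (fun p => ((p.2 : Int), p.1)) := by
  induction xs with
  | nil => intro s; rw [PySem.List.enumerate]; simp
  | cons x t ih =>
    intro s
    have hcast : ((s : Int) + 1) = ((s + 1 : Nat) : Int) := by push_cast; ring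
    rw [PySem.List.enumerate, List.zipIdx_cons, hcast, ih (s + 1)]
    simp

theorem pvMap_fst_zipIdx {α : Type} (xs : List α) : ∀ (s : Nat),
    (xs.zipIdx s).map Prod.fst = xs := by
  induction xs with
  | nil => intro s; rfl
  | cons x t ih => intro s; simp [List.zipIdx_cons, ih (s + 1)]

-- ===== VERDICT (by name: the statement is the Claim_ definition above) =====
theorem solution_spec : Claim_equal_solution := by
  intro files _ _
  show solution files = solution_alt files
  unfold solution solution_alt
  rw [PySem.List.foldl_append_singleton_eq_map, PySem.List.foldl_append_singleton_eq_map]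
  simp only [List.nil_append]
  have h0 : (0 : Int) = ((0 : Nat) : Int) := rfl
  rw [h0, pvEnum_eq_zipIdx files 0, List.map_map, pvSorted2_map, List.map_map]
  simp only [Function.comp, pvEntryA_head, pvEntryA_num]
  conv_rhs => rw [← pvMap_fst_zipIdx files 0, pvSorted2_map]
  apply List.map_congr_left
  intro p hp
  have hmem : p ∈ files.zipIdx 0 :=
    (PySem.List.sorted2_perm _ _ _ _).mem_iff.mp hp
  obtain ⟨f, i⟩ := p
  obtain ⟨-, hlt, hf⟩ := List.mem_zipIdx hmem
  have hget : PySem.List.pyGet? files (i : Int) = some f := by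
    rw [PySem.List.pyGet?_natCast,
      List.getElem?_eq_getElem (by omega : i < files.length)]
    simp [hf]
  simp [pvEntryA_idx, hget]
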